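-- pv_equiv track=rewrite | github.com/Tokyo113/leetcode_python | 中级班/chapter04/code_06_CoffeeCup.py | process
-- ===== SOURCE A (Python) =====
-- def process(arr, a, b, index, washline):
--     '''
--     返回该种方案下做完所有事情的最早时间
--     包括洗完当前咖啡杯并洗完剩下所有咖啡杯
--     :param arr:
--     :param a:
--     :param b:
--     :param index:
--     :param washline:
--     :return:
--     '''
--     if index == len(arr)-1:
--         return min(max(arr[index], washline)+a, arr[index]+b)
--     # 1.用洗咖啡机清洗
--     # 洗完当前咖啡杯的时间
--     wash = max(arr[index], washline)+a
--     # 洗完剩下的咖啡杯的时间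
--     res = process(arr, a, b, index+1, wash)
--     # 取max，取瓶颈
--     p1 = max(wash, res)
--
--     # 2.自然挥发
--     dry = arr[index]+b
--     res = process(arr, a,b,index+1, washline)
--     p2 = max(dry, res)
--
--     return min(p1, p2)
-- ===== SOURCE B (Python) =====
-- def process(arr, a, b, index, washline):
--     """Earliest finish time, computed by recursion memoized on the
--     (index, washline) state."""
--     memo = {}
--
--     def go(i, w):
--         key = (i, w)
--         if key in memo:
--             return memo[key]
--         if i == len(arr) - 1:
--             r = min(max(arr[i], w) + a, arr[i] + b)
--         else:
--             wash = max(arr[i], w) + a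
--             p1 = max(wash, go(i + 1, wash))
--             p2 = max(arr[i] + b, go(i + 1, w))
--             r = min(p1, p2)
--         memo[key] = r
--         return r
--
--     return go(index, washline)
-- ===== Notes on version B (the rewrite author's own statement) =====
-- stated objective: alternative
-- what changed: B memoizes the recursion on the (index, washline) state in a dictionary, so each reachable state is solved once instead of A's re-exploring both branches independently; intended as faster (measured 2.09x at the largest size both finished, unconfirmed beyond that), recorded here as alternative.
import Mathlib
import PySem

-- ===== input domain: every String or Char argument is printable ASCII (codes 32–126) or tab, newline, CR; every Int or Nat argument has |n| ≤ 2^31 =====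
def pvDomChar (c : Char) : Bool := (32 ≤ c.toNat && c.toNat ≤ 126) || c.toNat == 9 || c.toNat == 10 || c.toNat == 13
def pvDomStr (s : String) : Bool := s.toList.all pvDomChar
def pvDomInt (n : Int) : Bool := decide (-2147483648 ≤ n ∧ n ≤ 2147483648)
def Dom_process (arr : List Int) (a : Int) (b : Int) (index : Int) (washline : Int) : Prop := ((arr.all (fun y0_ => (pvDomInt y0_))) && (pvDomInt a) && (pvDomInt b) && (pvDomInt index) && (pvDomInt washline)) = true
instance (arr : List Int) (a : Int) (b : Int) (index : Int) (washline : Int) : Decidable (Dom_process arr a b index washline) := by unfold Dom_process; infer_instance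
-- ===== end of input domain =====

-- B memoizes the recursion on the (index, washline) state in a dictionary; A recurses on both branches without sharing.
-- Equivalence is on the inputs where the Python A returns (no IndexError): see Pre_process.

-- ===== PORT A =====
-- fuel makes the Int-indexed recursion total; under Pre_process 2*|arr| fuel always suffices
def goA (arr : List Int) (a : Int) (b : Int) : Nat → Int → Int → Int
  | 0, _, _ => 0
  | f + 1, index, washline =>
    if index = (arr.length : Int) - 1 then
      min (max ((PySem.List.pyGet? arr index).getD 0) washline + a)
          ((PySem.List.pyGet? arr index).getD 0 + b)
    else
      let wash := max ((PySem.List.pyGet? arr index).getD 0) washline + a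
      let res1 := goA arr a b f (index + 1) wash
      let p1 := max wash res1
      let dry := (PySem.List.pyGet? arr index).getD 0 + b
      let res2 := goA arr a b f (index + 1) washline
      let p2 := max dry res2
      min p1 p2

def process (arr : List Int) (a : Int) (b : Int) (index : Int) (washline : Int) : Int :=
  goA arr a b (2 * arr.length) index washline

-- ===== PORT B =====
def goB (arr : List Int) (a : Int) (b : Int) :
    Nat → Int → Int → PySem.Dict (Int × Int) Int → Int × PySem.Dict (Int × Int) Int
  | 0, _, _, memo => (0, memo)
  | f + 1, i, w, memo =>
    match PySem.Dict.get? memo (i, w) with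
    | some v => (v, memo)
    | none =>
      if i = (arr.length : Int) - 1 then
        let r := min (max ((PySem.List.pyGet? arr i).getD 0) w + a)
                     ((PySem.List.pyGet? arr i).getD 0 + b)
        (r, memo.insert (i, w) r)
      else
        let wash := max ((PySem.List.pyGet? arr i).getD 0) w + a
        let s1 := goB arr a b f (i + 1) wash memo
        let p1 := max wash s1.1
        let s2 := goB arr a b f (i + 1) w s1.2
        let p2 := max ((PySem.List.pyGet? arr i).getD 0 + b) s2.1
        let r := min p1 p2
        (r, s2.2.insert (i, w) r)

def process_alt (arr : List Int) (a : Int) (b : Int) (index : Int) (washline : Int) : Int :=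
  (goB arr a b (2 * arr.length) index washline PySem.Dict.empty).1

-- ===== PRECONDITION & SPEC =====
-- Pre_ excludes exactly the inputs where Python A raises IndexError: empty arr, or index outside [-len(arr), len(arr)-1].
def Pre_process (arr : List Int) (a : Int) (b : Int) (index : Int) (washline : Int) : Prop :=
  arr ≠ [] ∧ -(arr.length : Int) ≤ index ∧ index ≤ (arr.length : Int) - 1
instance (arr : List Int) (a : Int) (b : Int) (index : Int) (washline : Int) : Decidable (Pre_process arr a b index washline) := by unfold Pre_process; infer_instance

def pvWitness_process : List Int × Int × Int × Int × Int := ([1, 3, 5], 2, 6, 0, 0)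

def Spec_process (arr : List Int) (a : Int) (b : Int) (index : Int) (washline : Int) (out : Int) : Prop := out = process_alt arr a b index washline
instance (arr : List Int) (a : Int) (b : Int) (index : Int) (washline : Int) (out : Int) : Decidable (Spec_process arr a b index washline out) := by unfold Spec_process; infer_instance

-- ===== CLAIM (what is proved, stated in full; the proofs are below) =====
def Claim_equal_process : Prop := ∀ (arr : List Int) (a : Int) (b : Int) (index : Int) (washline : Int), Dom_process arr a b index washline → Pre_process arr a b index washline → Spec_process arr a b index washline (process arr a b index washline)

-- ===== LEMMAS AND PROOFS =====

-- canonical value of the recursion at state (i, w): goA with exactly enough fuel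
def canon (arr : List Int) (a : Int) (b : Int) (i w : Int) : Int :=
  goA arr a b ((arr.length : Int) - i).toNat i w

-- goA is fuel-irrelevant once fuel ≥ (len - i), for i ≤ len - 1
theorem goA_fuel (arr : List Int) (a b : Int) :
    ∀ (f1 f2 : Nat) (i w : Int), i ≤ (arr.length : Int) - 1 →
      ((arr.length : Int) - i).toNat ≤ f1 → ((arr.length : Int) - i).toNat ≤ f2 →
      goA arr a b f1 i w = goA arr a b f2 i w := by
  intro f1
  induction f1 with
  | zero => intro f2 i w hi h1 h2; omega
  | succ f ih =>
    intro f2 i w hi h1 h2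
    match f2 with
    | 0 => omega
    | f2' + 1 =>
      simp only [goA]
      by_cases hb : i = (arr.length : Int) - 1
      · simp [hb]
      · simp only [if_neg hb]
        have hi' : i + 1 ≤ (arr.length : Int) - 1 := by omega
        rw [ih f2' (i + 1) _ hi' (by omega) (by omega),
            ih f2' (i + 1) _ hi' (by omega) (by omega)]

theorem goA_eq_canon (arr : List Int) (a b : Int) (f : Nat) (i w : Int)
    (hi : i ≤ (arr.length : Int) - 1) (hf : ((arr.length : Int) - i).toNat ≤ f) :
    goA arr a b f i w = canon arr a b i w :=
  goA_fuel arr a b f _ i w hi hf (le_refl _)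

-- memo invariant: every stored entry is the canonical value of its state
def MemoInv (arr : List Int) (a b : Int) (memo : PySem.Dict (Int × Int) Int) : Prop :=
  ∀ (i w v : Int), memo.get? (i, w) = some v → v = canon arr a b i w

theorem memoInv_empty (arr : List Int) (a b : Int) : MemoInv arr a b PySem.Dict.empty := by
  intro i w v h
  simp [PySem.Dict.get?_empty] at h

-- main invariant lemma: with enough fuel and a correct memo, goB returns the canonical
-- value and leaves a correct memo
theorem goB_correct (arr : List Int) (a b : Int) :
    ∀ (f : Nat) (i w : Int) (memo : PySem.Dict (Int × Int) Int),
      i ≤ (arr.length : Int) - 1 → ((arr.length : Int) - i).toNat ≤ f →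
      MemoInv arr a b memo →
      (goB arr a b f i w memo).1 = canon arr a b i w ∧ MemoInv arr a b (goB arr a b f i w memo).2 := by
  intro f
  induction f with
  | zero => intro i w memo hi hf _; omega
  | succ f ih =>
    intro i w memo hi hf hInv
    have hcanon : canon arr a b i w =
        goA arr a b (((arr.length : Int) - (i + 1)).toNat + 1) i w := by
      unfold canon
      congr 1
      omega
    simp only [goB]
    cases hget : PySem.Dict.get? memo (i, w) with
    | some v =>
      exact ⟨hInv i w v hget, hInv⟩
    | none =>
      by_cases hb : i = (arr.length : Int) - 1
      · simp only [if_pos hb]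
        constructor
        · rw [hcanon]; simp [goA, hb]
        · intro i' w' v' h'
          rw [PySem.Dict.get?_insert] at h'
          split at h'
          · rename_i heq
            have hi' : i' = i := by
              have := congrArg Prod.fst heq; simpa using this
            have hw' : w' = w := by
              have := congrArg Prod.snd heq; simpa using this
            subst hi'; subst hw'
            injection h' with hv
            rw [← hv, hcanon]; simp [goA, hb]
          · exact hInv i' w' v' h'
      · simp only [if_neg hb]
        have hi1 : i + 1 ≤ (arr.length : Int) - 1 := by omega
        have hf1 : ((arr.length : Int) - (i + 1)).toNat ≤ f := by omega
        obtain ⟨h1v, h1inv⟩ := ih (i + 1) (max ((PySem.List.pyGet? arr i).getD 0) w + a) memo hi1 hf1 hInv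
        obtain ⟨h2v, h2inv⟩ := ih (i + 1) w _ hi1 hf1 h1inv
        have hres : min (max (max ((PySem.List.pyGet? arr i).getD 0) w + a)
              (goB arr a b f (i + 1) (max ((PySem.List.pyGet? arr i).getD 0) w + a) memo).1)
            (max ((PySem.List.pyGet? arr i).getD 0 + b)
              (goB arr a b f (i + 1) w (goB arr a b f (i + 1) (max ((PySem.List.pyGet? arr i).getD 0) w + a) memo).2).1)
            = canon arr a b i w := by
          rw [h1v, h2v, hcanon]
          simp only [goA, if_neg hb]
          rw [goA_eq_canon arr a b _ (i + 1) _ hi1 (le_refl _),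
              goA_eq_canon arr a b _ (i + 1) w hi1 (le_refl _)]
        refine ⟨hres, ?_⟩
        intro i' w' v' h'
        rw [PySem.Dict.get?_insert] at h'
        split at h'
        · rename_i heq
          have hi' : i' = i := by
            have := congrArg Prod.fst heq; simpa using this
          have hw' : w' = w := by
            have := congrArg Prod.snd heq; simpa using this
          subst hi'; subst hw'
          injection h' with hv
          rw [← hres]; exact hv.symm
        · exact h2inv i' w' v' h'

-- ===== VERDICT (by name: the statement is the Claim_ definition above) =====
theorem process_spec : Claim_equal_process := by
  intro arr a b index washline _hdom hpre
  obtain ⟨hne, hlo, hhi⟩ := hpre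
  unfold Spec_process process process_alt
  have hf : ((arr.length : Int) - index).toNat ≤ 2 * arr.length := by omega
  rw [goA_eq_canon arr a b _ index washline hhi hf]
  exact ((goB_correct arr a b (2 * arr.length) index washline PySem.Dict.empty hhi hf
    (memoInv_empty arr a b)).1).symm
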